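-- pv_equiv track=rewrite | github.com/rmei6/DS-A | Security_Values.py | getMinSum
-- ===== SOURCE A (Python) =====
-- def getMinSum(security_values, msg):
--     # Write your code here
--     values = []
--     for char in msg:
--         values.append(security_values[ord(char) - 97])
--     values.sort()
--     sum = 0
--     for num in range(0,len(values)-1):
--         sum += abs(values[num] - values[num+1])
--     return sum
-- ===== SOURCE B (Python) =====
-- def getMinSum(security_values, msg):
--     # Telescoping: on a sorted list the sum of adjacent gaps is max - min,
--     # so one pass tracking the running min and max suffices (no sort).
--     lo = None
--     hi = None
--     for char in msg:
--         v = security_values[ord(char) - 97]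
--         if lo is None or v < lo:
--             lo = v
--         if hi is None or v > hi:
--             hi = v
--     if lo is None:
--         return 0
--     return hi - lo
-- ===== Notes on version B (the rewrite author's own statement) =====
-- stated objective: faster
-- what changed: Replaces building the per-char value list, sorting it and summing adjacent absolute gaps by a single pass over the message tracking the running min and max, since the adjacent gaps of a sorted list telescope to max - min.
import Mathlib
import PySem

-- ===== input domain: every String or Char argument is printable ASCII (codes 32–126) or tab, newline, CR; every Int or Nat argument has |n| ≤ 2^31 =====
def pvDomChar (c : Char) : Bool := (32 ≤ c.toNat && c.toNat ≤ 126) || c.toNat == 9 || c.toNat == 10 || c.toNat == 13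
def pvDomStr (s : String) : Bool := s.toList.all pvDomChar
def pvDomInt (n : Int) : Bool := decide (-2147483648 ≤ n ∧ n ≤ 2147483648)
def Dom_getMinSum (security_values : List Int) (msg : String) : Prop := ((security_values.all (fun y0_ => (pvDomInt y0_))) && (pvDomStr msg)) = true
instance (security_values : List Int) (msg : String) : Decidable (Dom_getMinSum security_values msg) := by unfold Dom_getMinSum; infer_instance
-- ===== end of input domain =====

-- B replaces A's sort-then-sum-of-adjacent-gaps by a single pass tracking the
-- running min and max (the adjacent gaps of a sorted list telescope to max - min).

-- ===== PORT A =====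
def getMinSum (security_values : List Int) (msg : String) : Int :=
  let values : List Int :=
    msg.toList.foldl
      (fun acc char => acc ++ [PySem.List.pyGetD security_values ((char.toNat : Int) - 97) 0]) []
  let values := PySem.List.sorted values (fun x => x) false
  (PySem.List.pyRange 0 ((values.length : Int) - 1) 1).foldl
    (fun sum num =>
      sum + |PySem.List.pyGetD values num 0 - PySem.List.pyGetD values (num + 1) 0|) 0

-- ===== PORT B =====
def getMinSum_alt (security_values : List Int) (msg : String) : Int :=
  let st : Option Int × Option Int :=
    msg.toList.foldl
      (fun (p : Option Int × Option Int) char =>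
        let v := PySem.List.pyGetD security_values ((char.toNat : Int) - 97) 0
        (match p.1 with
         | none => some v
         | some lo => if v < lo then some v else some lo,
         match p.2 with
         | none => some v
         | some hi => if hi < v then some v else some hi))
      (none, none)
  match st with
  | (some lo, some hi) => hi - lo
  | _ => 0

-- ===== PRECONDITION & SPEC =====
-- Pre_: every looked-up index ord(char) - 97 is a valid Python index of
-- security_values (negative indices count from the end); elsewhere A raises IndexError.
def Pre_getMinSum (security_values : List Int) (msg : String) : Prop :=
  (msg.toList.all
    (fun c => decide (PySem.Raise.InRange security_values.length ((c.toNat : Int) - 97)))) = true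
instance (security_values : List Int) (msg : String) : Decidable (Pre_getMinSum security_values msg) := by unfold Pre_getMinSum; infer_instance
def pvWitness_getMinSum : List Int × String := ([5, 2, 9], "cab")
def Spec_getMinSum (security_values : List Int) (msg : String) (out : Int) : Prop := out = getMinSum_alt security_values msg
instance (security_values : List Int) (msg : String) (out : Int) : Decidable (Spec_getMinSum security_values msg out) := by unfold Spec_getMinSum; infer_instance

-- ===== CLAIM (what is proved, stated in full; the proofs are below) =====
def Claim_equal_getMinSum : Prop := ∀ (security_values : List Int) (msg : String), Dom_getMinSum security_values msg → Pre_getMinSum security_values msg → Spec_getMinSum security_values msg (getMinSum security_values msg)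

-- ===== LEMMAS AND PROOFS =====

-- The index-sum of adjacent absolute gaps, in getD form.
def pvAdjSum (s : List Int) : Int :=
  ((List.range (s.length - 1)).map (fun k => |s.getD k 0 - s.getD (k + 1) 0|)).sum

theorem pvAdjSum_cons_cons (x y : Int) (t : List Int) :
    pvAdjSum (x :: y :: t) = |x - y| + pvAdjSum (y :: t) := by
  simp [pvAdjSum, List.range_succ_eq_map, List.map_map, Function.comp_def]

theorem pvA_eq_adjSum (s : List Int) :
    (PySem.List.pyRange 0 ((s.length : Int) - 1) 1).foldl
      (fun sum num =>
        sum + |PySem.List.pyGetD s num 0 - PySem.List.pyGetD s (num + 1) 0|) 0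
    = pvAdjSum s := by
  rw [PySem.List.pyRange_one, List.foldl_map]
  have hlen : (((s.length : Int) - 1 - 0)).toNat = s.length - 1 := by omega
  rw [hlen]
  have hcong :
      List.foldl
        (fun (x : Int) (y : Nat) =>
          x + |PySem.List.pyGetD s (0 + (y : Int)) 0 - PySem.List.pyGetD s (0 + (y : Int) + 1) 0|)
        0 (List.range (s.length - 1))
      = List.foldl (fun (x : Int) (y : Nat) => x + |s.getD y 0 - s.getD (y + 1) 0|)
        0 (List.range (s.length - 1)) := by
    apply List.foldl_ext
    intro a b _
    have h1 : ((0 : Int) + (b : Int)) = ((b : Nat) : Int) := by ring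
    have h2 : ((b : Int) + 1) = (((b + 1 : Nat)) : Int) := by push_cast; ring
    rw [h1, h2, PySem.List.pyGetD_natCast, PySem.List.pyGetD_natCast]
  rw [hcong, PySem.List.foldl_add]
  simp [pvAdjSum]

-- last element of a ≤-pairwise list bounds every element
theorem pvLast_isMax (s : List Int) (hp : s.Pairwise (· ≤ ·)) (hne : s ≠ []) :
    ∀ y ∈ s, y ≤ s.getLast hne := by
  induction s with
  | nil => cases hne rfl
  | cons x t ih =>
    intro y hy
    cases t with
    | nil => simp at hy; simp [hy]
    | cons z t' =>
      rw [List.getLast_cons (by simp)]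
      rcases List.mem_cons.mp hy with rfl | hy'
      · exact le_trans (List.rel_of_pairwise_cons hp (List.mem_cons_self))
          (ih hp.of_cons (by simp) z List.mem_cons_self)
      · exact ih hp.of_cons (by simp) y hy'

-- telescoping: on a ≤-pairwise list the adjacent-gap sum is last - head
theorem pvAdjSum_telescope (t : List Int) : ∀ x : Int, (x :: t).Pairwise (· ≤ ·) →
    pvAdjSum (x :: t) = (x :: t).getLast (by simp) - x := by
  induction t with
  | nil => intro x _; simp [pvAdjSum]
  | cons y t' ih =>
    intro x hp
    have hxy : x ≤ y := List.rel_of_pairwise_cons hp List.mem_cons_self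
    have hL : (x :: y :: t').getLast (by simp) = (y :: t').getLast (by simp) :=
      List.getLast_cons (by simp)
    rw [pvAdjSum_cons_cons, ih y hp.of_cons, hL, abs_of_nonpos (by omega)]
    omega

-- B's loop computes the running min and max
theorem pvBfold (f : Char → Int) (l : List Char) : ∀ (a b : Int),
    l.foldl
      (fun (p : Option Int × Option Int) char =>
        let v := f char
        (match p.1 with
         | none => some v
         | some lo => if v < lo then some v else some lo,
         match p.2 with
         | none => some v
         | some hi => if hi < v then some v else some hi))
      (some a, some b)
    = (some (l.foldl (fun m c => min m (f c)) a), some (l.foldl (fun m c => max m (f c)) b)) := by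
  induction l with
  | nil => intro a b; rfl
  | cons c l' ih =>
    intro a b
    simp only [List.foldl_cons]
    rw [show (if f c < a then some (f c) else some a) = some (min a (f c)) by
          rw [min_def]; split_ifs <;> first | rfl | (exfalso; omega),
        show (if b < f c then some (f c) else some b) = some (max b (f c)) by
          rw [max_def]; split_ifs <;> first | rfl | (exfalso; omega) | (congr 1; omega)]
    exact ih (min a (f c)) (max b (f c))

theorem pvMain (security_values : List Int) (msg : String) :
    getMinSum security_values msg = getMinSum_alt security_values msg := by
  set f : Char → Int := fun char => PySem.List.pyGetD security_values ((char.toNat : Int) - 97) 0 with hf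
  unfold getMinSum getMinSum_alt
  rw [PySem.List.foldl_append_singleton_eq_map]
  simp only [List.nil_append]
  cases hmsg : msg.toList with
  | nil => simp
  | cons c rest =>
    -- B side
    rw [List.foldl_cons]
    simp only []
    rw [pvBfold f rest (f c) (f c)]
    -- A side
    rw [pvA_eq_adjSum]
    set vs : List Int := (c :: rest).map f with hvs
    set s := PySem.List.sorted vs (fun x => x) false with hs
    have hvs_ne : vs ≠ [] := by simp [hvs]
    have hs_ne : s ≠ [] := by
      intro h0; exact hvs_ne ((PySem.List.sorted_eq_nil_iff vs (fun x => x) false).mp h0)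
    obtain ⟨m, t, hst⟩ := List.exists_cons_of_ne_nil hs_ne
    have hpair : s.Pairwise (· ≤ ·) := PySem.List.sorted_pairwise vs (fun x => x)
    -- min / max characterisations
    have hminq : PySem.List.min? vs (fun y => y) = some (rest.foldl (fun m c => min m (f c)) (f c)) := by
      rw [hvs, List.map_cons, PySem.List.min?_id_cons, List.foldl_map]
    have hmaxq : PySem.List.max? vs (fun y => y) = some (rest.foldl (fun m c => max m (f c)) (f c)) := by
      rw [hvs, List.map_cons, PySem.List.max?_id_cons, List.foldl_map]
    set lo := rest.foldl (fun m c => min m (f c)) (f c)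
    set hi := rest.foldl (fun m c => max m (f c)) (f c)
    -- head of s equals lo
    have hm_mem_s : m ∈ s := by rw [hst]; exact List.mem_cons_self
    have hm_mem_vs : m ∈ vs := (PySem.List.mem_sorted vs (fun x => x) false m).mp hm_mem_s
    have hmlo : m = lo := by
      have h1 : m ≤ lo := PySem.List.key_head_sorted_le vs (fun x => x) hst lo (PySem.List.min?_mem hminq)
      have h2 : lo ≤ m := PySem.List.min?_isMin hminq m hm_mem_vs
      omega
    -- last of s equals hi
    have hg_mem_vs : s.getLast hs_ne ∈ vs :=
      (PySem.List.mem_sorted vs (fun x => x) false _).mp (List.getLast_mem hs_ne)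
    have hghi : s.getLast hs_ne = hi := by
      have h1 : s.getLast hs_ne ≤ hi := PySem.List.max?_isMax hmaxq _ hg_mem_vs
      have h2 : hi ≤ s.getLast hs_ne :=
        pvLast_isMax s hpair hs_ne hi
          ((PySem.List.mem_sorted vs (fun x => x) false hi).mpr (PySem.List.max?_mem hmaxq))
      omega
    have hpair' : (m :: t).Pairwise (· ≤ ·) := by rw [← hst]; exact hpair
    have htel := pvAdjSum_telescope t m hpair'
    rw [hst, htel]
    have hlast : (m :: t).getLast (by simp) = s.getLast hs_ne := by
      simp only [hst]
    rw [hlast, hghi, ← hmlo]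

-- ===== VERDICT (by name: the statement is the Claim_ definition above) =====
theorem getMinSum_spec : Claim_equal_getMinSum := by
  intro security_values msg _ _
  unfold Spec_getMinSum
  exact pvMain security_values msg
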